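-- pv_equiv track=rewrite | github.com/AndriiVasylenko-bit/learning-python | lab/USE/part_5.py | process_number
-- ===== SOURCE A (Python) =====
-- def process_number(N):
--     # Step 1: Найти сумму цифр N
--     digit_sum = sum(int(digit) for digit in str(N))
--     # Step 2: Перевести сумму в двоичный файл
--     binary_representation = bin(digit_sum)[2:]
--
--     # Step 3: Проверить, является ли число единиц в двоичном представлении чётным или нечётным
--     count_ones = binary_representation.count('1')
--
--     if count_ones % 2 == 0:
--         # Если число одинаковых, добавьте 1 слева и 00 справа
--         result = '1' + binary_representation + '00'
--     else:
--         # Если число элементов нечётно, добавьте '10' слева и '1' справа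
--         result = '10' + binary_representation + '1'
--
--     # Интерпретировать полученное двоичное представление как десятичное число R
--     R = int(result, 2)
--     return R
-- ===== SOURCE B (Python) =====
-- def _digit_sum(n):
--     s = 0
--     while n > 0:
--         s += n % 10
--         n //= 10
--     return s
--
--
-- def _bits(m):
--     # (number of 1-bits, bit length) of m >= 0, computed arithmetically; (0, 0) for 0
--     ones = 0
--     length = 0
--     while m > 0:
--         ones += m & 1
--         length += 1
--         m >>= 1
--     return ones, length
--
--
-- def process_number(N):
--     ds = _digit_sum(N)
--     ones, L = _bits(ds)
--     if L == 0:
--         L = 1  # bin(0)[2:] is the one-character string '0'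
--     if ones % 2 == 0:
--         return (1 << (L + 2)) + (ds << 2)
--     return (1 << (L + 2)) + (ds << 1) + 1
-- ===== Notes on version B (the rewrite author's own statement) =====
-- stated objective: alternative
-- what changed: B replaces all string work (str(N) digit scan, bin(), string concatenation, int(result,2)) by pure integer arithmetic: a divmod loop for the digit sum, a shift loop for popcount and bit length, and the result assembled with shifts and adds; no string is ever built or parsed.
import Mathlib
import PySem

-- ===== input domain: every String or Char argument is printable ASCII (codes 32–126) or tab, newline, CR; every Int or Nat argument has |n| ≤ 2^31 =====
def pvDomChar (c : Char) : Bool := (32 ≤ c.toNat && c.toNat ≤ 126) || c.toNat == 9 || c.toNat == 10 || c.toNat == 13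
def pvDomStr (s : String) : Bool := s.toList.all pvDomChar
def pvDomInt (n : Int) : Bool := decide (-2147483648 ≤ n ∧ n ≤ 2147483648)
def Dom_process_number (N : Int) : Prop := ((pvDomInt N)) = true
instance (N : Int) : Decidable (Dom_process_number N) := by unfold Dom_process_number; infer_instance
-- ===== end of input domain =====

-- B replaces A's string pipeline (str(N) digit scan, bin(), concatenation, int(.,2)) by pure
-- integer arithmetic (divmod loop, shift loop, shifts/adds); objective: alternative.

-- ===== PORT A =====
-- strings are ported as List Char (PySem.Chars side); s[2:] on a string that never lacks
-- 2 chars is List.drop 2; int(digit) is PySem.Int.ofChars? [d] (none = ValueError, excluded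
-- by Pre_process_number, so the .getD 0 default is unreachable there); int(result, 2) is
-- PySem.Int.ofCharsBase? result 2, which always succeeds on the binary strings built here.
def process_number (N : Int) : Int :=
  let digit_sum : Int := ((PySem.Int.toChars N).map (fun d => (PySem.Int.ofChars? [d]).getD 0)).sum
  let binary_representation : List Char := (PySem.Int.toBinChars0b digit_sum).drop 2
  let count_ones : Int := (PySem.Chars.count binary_representation ['1'] : Int)
  let result : List Char :=
    if PySem.Int.mod count_ones 2 = 0 then ['1'] ++ binary_representation ++ ['0', '0']
    else ['1', '0'] ++ binary_representation ++ ['1']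
  (PySem.Int.ofCharsBase? result 2).getD 0

-- ===== PORT B =====
-- B-side helper: the `while n > 0: s += n % 10; n //= 10` loop of _digit_sum
def pvDigitSumLoop (s n : Int) : Int :=
  if h : 0 < n then pvDigitSumLoop (s + PySem.Int.mod n 10) (PySem.Int.floordiv n 10) else s
termination_by n.toNat
decreasing_by
  have h10 : PySem.Int.floordiv n 10 = n / 10 := PySem.Int.floordiv_eq_ediv_of_pos (by norm_num)
  omega

-- B-side helper: the `while m > 0: ones += m & 1; length += 1; m >>= 1` loop of _bits
def pvBitsLoop (ones len m : Int) : Int × Int :=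
  if h : 0 < m then pvBitsLoop (ones + PySem.Int.band m 1) (len + 1) (m >>> (1 : Nat)) else (ones, len)
termination_by m.toNat
decreasing_by
  have hs : m >>> (1 : Nat) = m / 2 := by
    simpa using Int.shiftRight_eq_div_pow m 1
  omega

def process_number_alt (N : Int) : Int :=
  let ds := pvDigitSumLoop 0 N
  let p := pvBitsLoop 0 0 ds
  let ones := p.1
  let L := if p.2 = 0 then 1 else p.2
  if PySem.Int.mod ones 2 = 0 then ((1 : Int) <<< (L + 2).toNat) + (ds <<< (2 : Nat))
  else ((1 : Int) <<< (L + 2).toNat) + (ds <<< (1 : Nat)) + 1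

-- ===== PRECONDITION & SPEC =====
-- Pre_ excludes exactly the negative inputs: there str(N) starts with '-' and int('-')
-- raises ValueError in A.
def Pre_process_number (N : Int) : Prop := 0 ≤ N
instance (N : Int) : Decidable (Pre_process_number N) := by unfold Pre_process_number; infer_instance
def pvWitness_process_number : Int := 5

def Spec_process_number (N : Int) (out : Int) : Prop := out = process_number_alt N
instance (N : Int) (out : Int) : Decidable (Spec_process_number N out) := by unfold Spec_process_number; infer_instance

-- ===== CLAIM (what is proved, stated in full; the proofs are below) =====
def Claim_equal_process_number : Prop := ∀ (N : Int), Dom_process_number N → Pre_process_number N → Spec_process_number N (process_number N)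

-- ===== LEMMAS AND PROOFS =====

-- the tail of A after the digit sum, as a function of the digit sum
def pvTailA (ds : Int) : Int :=
  let binary_representation : List Char := (PySem.Int.toBinChars0b ds).drop 2
  let count_ones : Int := (PySem.Chars.count binary_representation ['1'] : Int)
  let result : List Char :=
    if PySem.Int.mod count_ones 2 = 0 then ['1'] ++ binary_representation ++ ['0', '0']
    else ['1', '0'] ++ binary_representation ++ ['1']
  (PySem.Int.ofCharsBase? result 2).getD 0

-- the tail of B after the digit sum, as a function of the digit sum
def pvTailB (ds : Int) : Int :=
  let p := pvBitsLoop 0 0 ds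
  let ones := p.1
  let L := if p.2 = 0 then 1 else p.2
  if PySem.Int.mod ones 2 = 0 then ((1 : Int) <<< (L + 2).toNat) + (ds <<< (2 : Nat))
  else ((1 : Int) <<< (L + 2).toNat) + (ds <<< (1 : Nat)) + 1

def pvDsA (N : Int) : Int := ((PySem.Int.toChars N).map (fun d => (PySem.Int.ofChars? [d]).getD 0)).sum

lemma procA_eq_tail (N : Int) : process_number N = pvTailA (pvDsA N) := rfl

lemma procB_eq_tail (N : Int) : process_number_alt N = pvTailB (pvDigitSumLoop 0 N) := rfl

-- structural version of Nat.toDigits (most significant digit first)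
def pvDigs (n : Nat) : List Char :=
  if h : n < 10 then [Nat.digitChar n]
  else pvDigs (n / 10) ++ [Nat.digitChar (n % 10)]
decreasing_by exact Nat.div_lt_self (by omega) (by omega)

lemma toDigitsCore_eq_pvDigs :
    ∀ (f n : Nat) (acc : List Char), n < f →
      Nat.toDigitsCore 10 f n acc = pvDigs n ++ acc := by
  intro f
  induction f with
  | zero => intro n acc h; omega
  | succ f ih =>
    intro n acc h
    rw [Nat.toDigitsCore]
    by_cases h10 : n < 10
    · have : n / 10 = 0 := Nat.div_eq_of_lt h10
      simp [this, pvDigs, h10, Nat.mod_eq_of_lt h10]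
    · have hne : ¬ n / 10 = 0 := by
        intro hz; exact h10 (by omega : n < 10)
      simp only [hne, if_false]
      rw [ih (n / 10) _ (by
        have := Nat.div_lt_self (by omega : 0 < n) (by omega : 1 < 10)
        omega)]
      conv_rhs => rw [pvDigs]
      simp [h10]

lemma toDigits_eq_pvDigs (n : Nat) : Nat.toDigits 10 n = pvDigs n :=
  (toDigitsCore_eq_pvDigs (n + 1) n [] (Nat.lt_succ_self n)).trans (by simp)

lemma pyval_digitChar : ∀ d : Nat, d < 10 →
    (PySem.Int.ofChars? [Nat.digitChar d]).getD 0 = (d : Int) := by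
  decide

-- accumulator lemma for B's digit-sum loop
lemma pvDigitSumLoop_acc_fuel : ∀ (k : Nat) (n : Int), n.toNat ≤ k → ∀ s : Int,
    pvDigitSumLoop s n = s + pvDigitSumLoop 0 n := by
  intro k
  induction k with
  | zero =>
    intro n hk s
    have hn : ¬ 0 < n := by omega
    conv_lhs => rw [pvDigitSumLoop]
    conv_rhs => rw [pvDigitSumLoop]
    simp [hn]
  | succ k ih =>
    intro n hk s
    by_cases hn : 0 < n
    · have h10 : PySem.Int.floordiv n 10 = n / 10 := PySem.Int.floordiv_eq_ediv_of_pos (by norm_num)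
      have hd := Int.ediv_add_emod n 10
      have h1 := Int.emod_nonneg n (by norm_num : (10:Int) ≠ 0)
      have h2 := Int.emod_lt_of_pos n (by norm_num : (0:Int) < 10)
      have hlt : (PySem.Int.floordiv n 10).toNat ≤ k := by omega
      rw [pvDigitSumLoop]
      conv_rhs => rw [pvDigitSumLoop]
      simp only [hn, dif_pos]
      rw [ih _ hlt, ih _ hlt (0 + PySem.Int.mod n 10)]
      ring
    · conv_lhs => rw [pvDigitSumLoop]
      conv_rhs => rw [pvDigitSumLoop]
      simp [hn]

lemma pvDigitSumLoop_acc (n : Int) (s : Int) : pvDigitSumLoop s n = s + pvDigitSumLoop 0 n :=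
  pvDigitSumLoop_acc_fuel n.toNat n le_rfl s

lemma pvDigitSumLoop_natCast (n : Nat) (h : 0 < n) :
    pvDigitSumLoop 0 (n : Int) = ((n % 10 : Nat) : Int) + pvDigitSumLoop 0 ((n / 10 : Nat) : Int) := by
  rw [pvDigitSumLoop]
  have hp : (0 : Int) < (n : Int) := by exact_mod_cast h
  simp only [hp, dif_pos]
  rw [pvDigitSumLoop_acc]
  simp

-- A's string digit sum equals B's arithmetic digit sum on nonnegative inputs
lemma sum_pvDigs (n : Nat) :
    ((pvDigs n).map (fun d => (PySem.Int.ofChars? [d]).getD 0)).sum = pvDigitSumLoop 0 (n : Int) := by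
  induction n using pvDigs.induct with
  | case1 n h =>
    conv_lhs => rw [pvDigs]
    rw [dif_pos h]
    simp only [List.map_cons, List.map_nil, List.sum_cons, List.sum_nil]
    rw [pyval_digitChar n h]
    by_cases hz : n = 0
    · subst hz; rw [pvDigitSumLoop]; norm_num
    · rw [pvDigitSumLoop_natCast n (by omega)]
      have h1 : n % 10 = n := Nat.mod_eq_of_lt h
      have h2 : n / 10 = 0 := Nat.div_eq_of_lt h
      rw [h1, h2, pvDigitSumLoop]
      norm_num
  | case2 n h ih =>
    conv_lhs => rw [pvDigs]
    rw [dif_neg h, List.map_append, List.sum_append]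
    simp only [List.map_cons, List.map_nil, List.sum_cons, List.sum_nil, ih]
    rw [pyval_digitChar _ (Nat.mod_lt n (by omega))]
    rw [pvDigitSumLoop_natCast n (by omega)]
    ring

lemma pvDsA_eq (n : Nat) : pvDsA (n : Int) = pvDigitSumLoop 0 (n : Int) := by
  unfold pvDsA
  rw [show PySem.Int.toChars (n : Int) = Nat.toDigits 10 n by
    simp [PySem.Int.toChars, not_lt.mpr (Int.natCast_nonneg n)]]
  rw [toDigits_eq_pvDigs]
  exact sum_pvDigs n

-- the digit sum of an input below 10^k is at most 9k
lemma pvDigitSumLoop_le : ∀ (k n : Nat), n < 10 ^ k → pvDigitSumLoop 0 (n : Int) ≤ 9 * k := by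
  intro k
  induction k with
  | zero =>
    intro n h
    have : n = 0 := by omega
    subst this
    rw [pvDigitSumLoop]; norm_num
  | succ k ih =>
    intro n h
    by_cases hz : n = 0
    · subst hz; rw [pvDigitSumLoop]; simp; positivity
    · rw [pvDigitSumLoop_natCast n (by omega)]
      have h1 : (((n % 10 : Nat)) : Int) ≤ 9 := by
        have := Nat.mod_lt n (by omega : 0 < 10); omega
      have h2 : n / 10 < 10 ^ k := by
        have : n < 10 * 10 ^ k := by rw [pow_succ] at h; omega
        omega
      have := ih (n / 10) h2
      omega

lemma pvDigitSumLoop_nonneg_fuel : ∀ (k : Nat) (n : Int), n.toNat ≤ k →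
    0 ≤ pvDigitSumLoop 0 n := by
  intro k
  induction k with
  | zero =>
    intro n hk
    have hn : ¬ 0 < n := by omega
    rw [pvDigitSumLoop]; simp [hn]
  | succ k ih =>
    intro n hk
    by_cases hn : 0 < n
    · have h10 : PySem.Int.floordiv n 10 = n / 10 := PySem.Int.floordiv_eq_ediv_of_pos (by norm_num)
      have hd := Int.ediv_add_emod n 10
      have h1 := Int.emod_nonneg n (by norm_num : (10:Int) ≠ 0)
      have h2 := Int.emod_lt_of_pos n (by norm_num : (0:Int) < 10)
      rw [pvDigitSumLoop]
      simp only [hn, dif_pos]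
      rw [pvDigitSumLoop_acc]
      have hm := PySem.Int.mod_nonneg n (by norm_num : (0:Int) < 10)
      have := ih (PySem.Int.floordiv n 10) (by omega)
      omega
    · rw [pvDigitSumLoop]; simp [hn]

lemma pvDigitSumLoop_nonneg (n : Int) : 0 ≤ pvDigitSumLoop 0 n :=
  pvDigitSumLoop_nonneg_fuel n.toNat n le_rfl

-- B's bits loop computes exactly popcount and bit length (on nonnegative input)
lemma pvBitsLoop_eq_fuel : ∀ (k : Nat) (m : Int), m.toNat ≤ k → 0 ≤ m → ∀ ones len : Int,
    pvBitsLoop ones len m =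
      (ones + (PySem.Int.bitCount m : Int), len + (PySem.Int.bitLength m : Int)) := by
  intro k
  induction k with
  | zero =>
    intro m hk hm ones len
    have hz : m = 0 := by omega
    subst hz
    rw [pvBitsLoop]
    simp [PySem.Int.bitCount_zero, PySem.Int.bitLength_zero]
  | succ k ih =>
    intro m hk hm ones len
    by_cases hp : 0 < m
    · have hs : m >>> (1 : Nat) = m / 2 := by simpa using Int.shiftRight_eq_div_pow m 1
      have h2 : PySem.Int.floordiv m 2 = m / 2 := PySem.Int.floordiv_eq_ediv_of_pos (by norm_num)
      have hd := Int.ediv_add_emod m 2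
      have hr1 := Int.emod_nonneg m (by norm_num : (2:Int) ≠ 0)
      have hr2 := Int.emod_lt_of_pos m (by norm_num : (0:Int) < 2)
      rw [pvBitsLoop]
      simp only [hp, dif_pos]
      rw [ih (m >>> (1 : Nat)) (by omega) (by omega)]
      rw [PySem.Int.bitCount_of_pos hp, PySem.Int.bitLength_of_pos hp]
      have hb1 : PySem.Int.band m 1 = PySem.Int.mod m 2 := PySem.Int.band_one m
      have hmn := PySem.Int.mod_nonneg m (by norm_num : (0:Int) < 2)
      rw [hs, ← h2, hb1]
      simp only [Prod.mk.injEq]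
      omega
    · have hz : m = 0 := by omega
      subst hz
      rw [pvBitsLoop]
      simp [PySem.Int.bitCount_zero, PySem.Int.bitLength_zero]

-- B's tail re-expressed through the transparent bitCount/bitLength (for kernel evaluation)
def pvTailB' (m : Nat) : Int :=
  let ones : Int := (PySem.Int.bitCount (m : Int) : Int)
  let L : Int := if (PySem.Int.bitLength (m : Int) : Int) = 0 then 1
                 else (PySem.Int.bitLength (m : Int) : Int)
  if PySem.Int.mod ones 2 = 0 then ((1 : Int) <<< (L + 2).toNat) + ((m : Int) <<< (2 : Nat))
  else ((1 : Int) <<< (L + 2).toNat) + ((m : Int) <<< (1 : Nat)) + 1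

lemma pvTailB_eq (m : Nat) : pvTailB (m : Int) = pvTailB' m := by
  unfold pvTailB pvTailB'
  rw [pvBitsLoop_eq_fuel (m : Int).toNat (m : Int) le_rfl (Int.natCast_nonneg m)]
  norm_num

-- the two tails agree on every digit sum an admitted input can produce
lemma tails_eq_small' : ∀ m : Fin 91, pvTailA ((m : Nat) : Int) = pvTailB' (m : Nat) := by
  decide

lemma tails_eq_small (m : Fin 91) : pvTailA ((m : Nat) : Int) = pvTailB ((m : Nat) : Int) := by
  rw [pvTailB_eq]; exact tails_eq_small' m

-- ===== VERDICT (by name: the statement is the Claim_ definition above) =====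
theorem process_number_spec : Claim_equal_process_number := by
  intro N hDom hPre
  unfold Spec_process_number
  rw [procA_eq_tail, procB_eq_tail]
  obtain ⟨n, rfl⟩ : ∃ n : Nat, N = (n : Int) := ⟨N.toNat, (Int.toNat_of_nonneg hPre).symm⟩
  rw [pvDsA_eq]
  have hn : n ≤ 2147483648 := by
    unfold Dom_process_number pvDomInt at hDom
    simp only [decide_eq_true_eq] at hDom
    exact_mod_cast hDom.2
  have hlt : n < 10 ^ 10 := by omega
  have hle := pvDigitSumLoop_le 10 n hlt
  have hnn := pvDigitSumLoop_nonneg (n : Int)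
  obtain ⟨m, hm⟩ : ∃ m : Nat, pvDigitSumLoop 0 (n : Int) = (m : Int) :=
    ⟨(pvDigitSumLoop 0 (n : Int)).toNat, (Int.toNat_of_nonneg hnn).symm⟩
  rw [hm]
  have hm91 : m < 91 := by rw [hm] at hle; omega
  exact tails_eq_small ⟨m, hm91⟩
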